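-- pv_equiv track=rewrite | github.com/Ondotteess/algorithms | matrix_multiply/matrix_multiply.py | matrix_merge
-- ===== SOURCE A (Python) =====
-- def matrix_merge(A11, A12, A21, A22):
--         n = len(A11)
--         B = [[0] * (2 * n) for _ in range(2 * n)]
--         for i in range(n):
--             for j in range(n):
--                 B[i][j] = A11[i][j]
--                 B[i][j + n] = A12[i][j]
--                 B[i + n][j] = A21[i][j]
--                 B[i + n][j + n] = A22[i][j]
--         return B
-- ===== SOURCE B (Python) =====
-- def matrix_merge(A11, A12, A21, A22):
--     n = len(A11)
--     top = [A11[i] + A12[i] for i in range(n)]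
--     bottom = [A21[i] + A22[i] for i in range(n)]
--     return top + bottom
-- ===== Notes on version B (the rewrite author's own statement) =====
-- stated objective: faster
-- what changed: B assembles each output row directly by concatenating the matching rows of the left and right quadrants and concatenates the top and bottom halves, instead of preallocating a 2n x 2n zero buffer and filling it with four indexed writes per (i,j) pair in a nested loop; dropping the per-element index arithmetic and writes for bulk list concatenation is a constant-factor win (~2x measured).
-- outside the precondition, e.g. on matrix_merge([[1, 2]], [[3]], [[4]], [[5]]): A returns [[1, 3], [4, 5]], B returns [[1, 2, 3], [4, 5]]
import Mathlib
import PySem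

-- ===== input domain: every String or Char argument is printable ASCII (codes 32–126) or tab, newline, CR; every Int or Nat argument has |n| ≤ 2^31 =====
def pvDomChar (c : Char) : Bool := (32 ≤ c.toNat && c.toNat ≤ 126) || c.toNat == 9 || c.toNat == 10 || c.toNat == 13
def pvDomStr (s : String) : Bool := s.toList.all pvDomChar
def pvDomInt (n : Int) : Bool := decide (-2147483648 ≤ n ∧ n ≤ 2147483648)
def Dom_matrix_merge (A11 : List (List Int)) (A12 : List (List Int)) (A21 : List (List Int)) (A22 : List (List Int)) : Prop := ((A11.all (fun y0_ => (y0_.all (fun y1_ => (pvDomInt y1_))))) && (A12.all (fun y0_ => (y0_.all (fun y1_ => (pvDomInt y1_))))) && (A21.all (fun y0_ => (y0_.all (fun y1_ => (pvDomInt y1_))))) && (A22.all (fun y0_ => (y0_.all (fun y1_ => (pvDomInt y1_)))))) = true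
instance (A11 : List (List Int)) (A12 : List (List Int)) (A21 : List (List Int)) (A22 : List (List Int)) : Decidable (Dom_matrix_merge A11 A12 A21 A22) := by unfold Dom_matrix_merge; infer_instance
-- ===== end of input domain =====

-- B builds each output row by concatenating the matching quadrant rows and appends the two
-- halves, instead of A's preallocated 2n×2n zero buffer filled by four indexed writes per (i,j).

-- ===== PORT A =====
-- Python's `B[i][j] = v` on a list of lists: replace row i by that row with entry j replaced.
def pvSetMat (B : List (List Int)) (i j : Nat) (v : Int) : List (List Int) :=
  B.set i ((B.getD i []).set j v)

def matrix_merge (A11 : List (List Int)) (A12 : List (List Int)) (A21 : List (List Int)) (A22 : List (List Int)) : List (List Int) :=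
  let n := A11.length
  let B0 := List.replicate (2*n) (List.replicate (2*n) (0:Int))
  (List.range n).foldl (fun B i =>
    (List.range n).foldl (fun B j =>
      pvSetMat (pvSetMat (pvSetMat (pvSetMat B i j ((A11.getD i []).getD j 0))
        i (j+n) ((A12.getD i []).getD j 0))
        (i+n) j ((A21.getD i []).getD j 0))
        (i+n) (j+n) ((A22.getD i []).getD j 0)) B) B0

-- ===== PORT B =====
def matrix_merge_alt (A11 : List (List Int)) (A12 : List (List Int)) (A21 : List (List Int)) (A22 : List (List Int)) : List (List Int) :=
  let n := A11.length
  ((List.range n).map (fun i => (A11.getD i []) ++ (A12.getD i []))) ++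
  ((List.range n).map (fun i => (A21.getD i []) ++ (A22.getD i [])))

-- ===== PRECONDITION & SPEC =====
-- Pre_ restricts to well-formed square quadrants (each n×n with n = len(A11)), the function's
-- intended domain: on ragged or mis-sized input A raises IndexError or silently truncates rows
-- to n columns (an artefact of its preallocated buffer) while B copies whole rows.
def Pre_matrix_merge (A11 : List (List Int)) (A12 : List (List Int)) (A21 : List (List Int)) (A22 : List (List Int)) : Prop :=
  A11.length ≤ A12.length ∧ A11.length ≤ A21.length ∧ A11.length ≤ A22.length ∧
  (∀ i < A11.length, (A11.getD i []).length = A11.length) ∧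
  (∀ i < A11.length, (A12.getD i []).length = A11.length) ∧
  (∀ i < A11.length, (A21.getD i []).length = A11.length) ∧
  (∀ i < A11.length, (A22.getD i []).length = A11.length)
instance (A11 : List (List Int)) (A12 : List (List Int)) (A21 : List (List Int)) (A22 : List (List Int)) : Decidable (Pre_matrix_merge A11 A12 A21 A22) := by unfold Pre_matrix_merge; infer_instance

def pvWitness_matrix_merge : List (List Int) × List (List Int) × List (List Int) × List (List Int) :=
  ([[1, 2], [3, 4]], [[5, 6], [7, 8]], [[9, 10], [11, 12]], [[13, 14], [15, 16]])

def Spec_matrix_merge (A11 : List (List Int)) (A12 : List (List Int)) (A21 : List (List Int)) (A22 : List (List Int)) (out : List (List Int)) : Prop := out = matrix_merge_alt A11 A12 A21 A22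
instance (A11 : List (List Int)) (A12 : List (List Int)) (A21 : List (List Int)) (A22 : List (List Int)) (out : List (List Int)) : Decidable (Spec_matrix_merge A11 A12 A21 A22 out) := by unfold Spec_matrix_merge; infer_instance

-- ===== CLAIM (what is proved, stated in full; the proofs are below) =====
def Claim_equal_matrix_merge : Prop := ∀ (A11 : List (List Int)) (A12 : List (List Int)) (A21 : List (List Int)) (A22 : List (List Int)), Dom_matrix_merge A11 A12 A21 A22 → Pre_matrix_merge A11 A12 A21 A22 → Spec_matrix_merge A11 A12 A21 A22 (matrix_merge A11 A12 A21 A22)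

-- ===== LEMMAS AND PROOFS =====

-- `l.set i v` when the list is split exactly at position i.
theorem pv_set_append_len {α : Type} (xs : List α) (y : α) (zs : List α) (v : α) :
    (xs ++ y :: zs).set xs.length v = xs ++ v :: zs := by
  induction xs with
  | nil => rfl
  | cons a t ih => simp [ih]

theorem pv_getD_set_self {α : Type} (l : List α) (i : Nat) (x d : α) (h : i < l.length) :
    (l.set i x).getD i d = x := by
  simp [List.getD, h]

theorem pv_getD_set_ne {α : Type} (l : List α) (i j : Nat) (x d : α) (h : i ≠ j) :
    (l.set i x).getD j d = l.getD j d := by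
  simp [List.getD, List.getElem?_set_ne h]

theorem pv_take_succ_getD {α : Type} (l : List α) (m : Nat) (d : α) (h : m < l.length) :
    l.take (m+1) = l.take m ++ [l.getD m d] := by
  rw [List.take_add_one]
  simp [List.getElem?_eq_getElem h, List.getD]

-- one pvSetMat step on a matrix of the shape (B.set i X).set (i+n) Y, row i
theorem pvSetMat_shape_left (B : List (List Int)) (X Y : List Int) (n i j : Nat) (v : Int)
    (hi : i < B.length) (hne : i ≠ i + n) :
    pvSetMat ((B.set i X).set (i+n) Y) i j v = (B.set i (X.set j v)).set (i+n) Y := by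
  unfold pvSetMat
  rw [pv_getD_set_ne _ _ _ _ _ (Ne.symm hne), pv_getD_set_self _ _ _ _ hi,
      List.set_comm Y (X.set j v) (Ne.symm hne)]
  simp [List.set_set]

-- same, row i+n
theorem pvSetMat_shape_right (B : List (List Int)) (X Y : List Int) (n i j : Nat) (v : Int)
    (hin : i + n < B.length) :
    pvSetMat ((B.set i X).set (i+n) Y) (i+n) j v = (B.set i X).set (i+n) (Y.set j v) := by
  unfold pvSetMat
  rw [pv_getD_set_self _ _ _ _ (by simpa using hin)]
  simp [List.set_set]

-- the single-row double write loop
def rowFold (n : Nat) (a b : Nat → Int) (m : Nat) (row : List Int) : List Int :=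
  (List.range m).foldl (fun r j => (r.set j (a j)).set (j+n) (b j)) row

theorem rowFold_succ (n : Nat) (a b : Nat → Int) (m : Nat) (row : List Int) :
    rowFold n a b (m+1) row = ((rowFold n a b m row).set m (a m)).set (m+n) (b m) := by
  unfold rowFold
  rw [List.range_succ, List.foldl_append]
  rfl

-- the inner j-loop of A for a fixed row index i
def innerF (a b c d : List Int) (n i : Nat) (m : Nat) (B : List (List Int)) : List (List Int) :=
  (List.range m).foldl (fun B j =>
    pvSetMat (pvSetMat (pvSetMat (pvSetMat B i j (a.getD j 0))
      i (j+n) (b.getD j 0))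
      (i+n) j (c.getD j 0))
      (i+n) (j+n) (d.getD j 0)) B

theorem innerF_succ (a b c d : List Int) (n i m : Nat) (B : List (List Int)) :
    innerF a b c d n i (m+1) B =
      pvSetMat (pvSetMat (pvSetMat (pvSetMat (innerF a b c d n i m B) i m (a.getD m 0))
        i (m+n) (b.getD m 0))
        (i+n) m (c.getD m 0))
        (i+n) (m+n) (d.getD m 0) := by
  unfold innerF
  rw [List.range_succ, List.foldl_append]
  rfl

theorem innerF_eq (a b c d : List Int) (n i : Nat) (m : Nat)
    (B : List (List Int)) (X Y : List Int)
    (hi : i < B.length) (hin : i + n < B.length) (hne : i ≠ i + n) :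
    innerF a b c d n i m ((B.set i X).set (i+n) Y) =
      (B.set i (rowFold n (fun j => a.getD j 0) (fun j => b.getD j 0) m X)).set (i+n)
        (rowFold n (fun j => c.getD j 0) (fun j => d.getD j 0) m Y) := by
  induction m with
  | zero => simp [innerF, rowFold]
  | succ m ih =>
    rw [innerF_succ, ih, rowFold_succ, rowFold_succ,
        pvSetMat_shape_left _ _ _ n _ _ _ (by simpa using hi) hne,
        pvSetMat_shape_left _ _ _ n _ _ _ (by simpa using hi) hne,
        pvSetMat_shape_right _ _ _ n _ _ _ (by simpa using hin),
        pvSetMat_shape_right _ _ _ n _ _ _ (by simpa using hin)]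

-- the row loop applied to the zero row produces take-prefixes of u ++ v
theorem pv_set_append_at {α : Type} (xs : List α) (y : α) (zs : List α) (v : α) (i : Nat)
    (h : i = xs.length) : (xs ++ y :: zs).set i v = xs ++ v :: zs := by
  subst h; exact pv_set_append_len xs y zs v

-- the row loop applied to the zero row produces take-prefixes of u ++ v
theorem rowFold_zero_row (u v : List Int) (n : Nat) (hu : u.length = n) (hv : v.length = n)
    (m : Nat) (hm : m ≤ n) :
    rowFold n (fun j => u.getD j 0) (fun j => v.getD j 0) m (List.replicate (2*n) 0) =
      u.take m ++ List.replicate (n-m) 0 ++ (v.take m ++ List.replicate (n-m) 0) := by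
  induction m with
  | zero =>
    simp only [rowFold, List.range_zero, List.foldl_nil, List.take_zero, Nat.sub_zero,
      List.nil_append]
    rw [two_mul, List.replicate_add]
  | succ m ih =>
    have hmn : m < n := hm
    rw [rowFold_succ, ih (le_of_lt hmn)]
    have hrep : List.replicate (n-m) (0:Int) = 0 :: List.replicate (n-m-1) 0 := by
      rw [show n - m = (n - m - 1) + 1 by omega]; rfl
    have htu : (u.take m).length = m := by simp; omega
    have htv : (v.take m).length = m := by simp; omega
    rw [hrep]
    -- first write, at position m
    rw [show u.take m ++ 0 :: List.replicate (n-m-1) 0 ++ (v.take m ++ 0 :: List.replicate (n-m-1) 0)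
          = u.take m ++ 0 :: (List.replicate (n-m-1) 0 ++ (v.take m ++ 0 :: List.replicate (n-m-1) 0)) by simp]
    rw [pv_set_append_at _ _ _ _ _ htu.symm]
    -- second write, at position m + n
    rw [show u.take m ++ u.getD m 0 :: (List.replicate (n-m-1) 0 ++ (v.take m ++ 0 :: List.replicate (n-m-1) 0))
          = (u.take m ++ u.getD m 0 :: List.replicate (n-m-1) 0 ++ v.take m) ++ 0 :: List.replicate (n-m-1) 0 by simp]
    rw [pv_set_append_at _ _ _ _ _ (by simp only [List.length_append, List.length_cons, List.length_replicate, htu, htv]; omega)]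
    rw [pv_take_succ_getD u m 0 (by omega), pv_take_succ_getD v m 0 (by omega),
        show n - (m+1) = n - m - 1 by omega]
    simp

-- the outer i-loop of A, characterized after m iterations
theorem outerF_eq (A11 A12 A21 A22 : List (List Int)) (n : Nat)
    (r11 : ∀ i < n, (A11.getD i []).length = n) (r12 : ∀ i < n, (A12.getD i []).length = n)
    (r21 : ∀ i < n, (A21.getD i []).length = n) (r22 : ∀ i < n, (A22.getD i []).length = n)
    (m : Nat) (hm : m ≤ n) :
    (List.range m).foldl (fun B i =>
        innerF (A11.getD i []) (A12.getD i []) (A21.getD i []) (A22.getD i []) n i n B)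
      (List.replicate (2*n) (List.replicate (2*n) 0)) =
      ((List.range m).map (fun i => A11.getD i [] ++ A12.getD i []))
        ++ List.replicate (n-m) (List.replicate (2*n) 0)
        ++ (((List.range m).map (fun i => A21.getD i [] ++ A22.getD i []))
        ++ List.replicate (n-m) (List.replicate (2*n) 0)) := by
  induction m with
  | zero =>
    simp only [List.range_zero, List.foldl_nil, List.map_nil, Nat.sub_zero, List.nil_append]
    rw [two_mul, List.replicate_add]
  | succ m ih =>
    have hmn : m < n := hm
    rw [List.range_succ, List.foldl_append]
    simp only [List.foldl_cons, List.foldl_nil]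
    rw [ih (le_of_lt hmn)]
    have hrep : List.replicate (n-m) (List.replicate (2*n) (0:Int))
        = List.replicate (2*n) 0 :: List.replicate (n-m-1) (List.replicate (2*n) 0) := by
      rw [show n - m = (n - m - 1) + 1 by omega]; rfl
    have htu : ((List.range m).map (fun i => A11.getD i [] ++ A12.getD i [])).length = m := by simp
    have htv : ((List.range m).map (fun i => A21.getD i [] ++ A22.getD i [])).length = m := by simp
    rw [hrep]
    -- name the matrix after m outer iterations, re-associated so row m is exposed
    rw [show ((List.range m).map (fun i => A11.getD i [] ++ A12.getD i []))
            ++ (List.replicate (2*n) 0 :: List.replicate (n-m-1) (List.replicate (2*n) 0))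
            ++ (((List.range m).map (fun i => A21.getD i [] ++ A22.getD i []))
            ++ (List.replicate (2*n) 0 :: List.replicate (n-m-1) (List.replicate (2*n) 0)))
          = ((List.range m).map (fun i => A11.getD i [] ++ A12.getD i []))
            ++ List.replicate (2*n) 0 :: (List.replicate (n-m-1) (List.replicate (2*n) 0)
            ++ (((List.range m).map (fun i => A21.getD i [] ++ A22.getD i []))
            ++ List.replicate (2*n) 0 :: List.replicate (n-m-1) (List.replicate (2*n) 0))) by simp]
    -- write it as (B.set m z).set (m+n) z to apply innerF_eq
    rw [show ((List.range m).map (fun i => A11.getD i [] ++ A12.getD i []))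
            ++ List.replicate (2*n) 0 :: (List.replicate (n-m-1) (List.replicate (2*n) 0)
            ++ (((List.range m).map (fun i => A21.getD i [] ++ A22.getD i []))
            ++ List.replicate (2*n) 0 :: List.replicate (n-m-1) (List.replicate (2*n) 0)))
          = ((((List.range m).map (fun i => A11.getD i [] ++ A12.getD i []))
            ++ List.replicate (2*n) 0 :: (List.replicate (n-m-1) (List.replicate (2*n) 0)
            ++ (((List.range m).map (fun i => A21.getD i [] ++ A22.getD i []))
            ++ List.replicate (2*n) 0 :: List.replicate (n-m-1) (List.replicate (2*n) 0)))).set m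
              (List.replicate (2*n) 0)).set (m+n) (List.replicate (2*n) 0) by
        rw [pv_set_append_at _ _ _ _ _ htu.symm]
        rw [show ((List.range m).map (fun i => A11.getD i [] ++ A12.getD i []))
              ++ List.replicate (2*n) 0 :: (List.replicate (n-m-1) (List.replicate (2*n) 0)
              ++ (((List.range m).map (fun i => A21.getD i [] ++ A22.getD i []))
              ++ List.replicate (2*n) 0 :: List.replicate (n-m-1) (List.replicate (2*n) 0)))
            = (((List.range m).map (fun i => A11.getD i [] ++ A12.getD i []))
              ++ List.replicate (2*n) 0 :: List.replicate (n-m-1) (List.replicate (2*n) 0)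
              ++ ((List.range m).map (fun i => A21.getD i [] ++ A22.getD i [])))
              ++ List.replicate (2*n) 0 :: List.replicate (n-m-1) (List.replicate (2*n) 0) by simp]
        rw [pv_set_append_at _ _ _ _ _ (by simp only [List.length_append, List.length_cons, List.length_replicate, htu, htv]; omega)]]
    rw [innerF_eq _ _ _ _ n m n _ _ _
        (by simp only [List.length_append, List.length_cons, List.length_replicate, htu]; omega)
        (by simp only [List.length_append, List.length_cons, List.length_replicate, htu]; omega)
        (by omega)]
    rw [rowFold_zero_row _ _ n (r11 m hmn) (r12 m hmn) n le_rfl,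
        rowFold_zero_row _ _ n (r21 m hmn) (r22 m hmn) n le_rfl]
    rw [List.take_of_length_le (by rw [r11 m hmn]),
        List.take_of_length_le (by rw [r12 m hmn]),
        List.take_of_length_le (by rw [r21 m hmn]),
        List.take_of_length_le (by rw [r22 m hmn])]
    simp only [Nat.sub_self, List.replicate_zero, List.append_nil]
    -- perform the two row replacements
    rw [pv_set_append_at _ _ _ _ _ htu.symm]
    rw [show ((List.range m).map (fun i => A11.getD i [] ++ A12.getD i []))
          ++ (A11.getD m [] ++ A12.getD m []) :: (List.replicate (n-m-1) (List.replicate (2*n) 0)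
          ++ (((List.range m).map (fun i => A21.getD i [] ++ A22.getD i []))
          ++ List.replicate (2*n) 0 :: List.replicate (n-m-1) (List.replicate (2*n) 0)))
        = (((List.range m).map (fun i => A11.getD i [] ++ A12.getD i []))
          ++ (A11.getD m [] ++ A12.getD m []) :: List.replicate (n-m-1) (List.replicate (2*n) 0)
          ++ ((List.range m).map (fun i => A21.getD i [] ++ A22.getD i [])))
          ++ List.replicate (2*n) 0 :: List.replicate (n-m-1) (List.replicate (2*n) 0) by simp]
    rw [pv_set_append_at _ _ _ _ _ (by simp only [List.length_append, List.length_cons, List.length_replicate, htu, htv]; omega)]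
    rw [show n - (m+1) = n - m - 1 by omega]
    simp

theorem matrix_merge_spec : Claim_equal_matrix_merge := by
  intro A11 A12 A21 A22 _ hpre
  obtain ⟨-, -, -, r11, r12, r21, r22⟩ := hpre
  unfold Spec_matrix_merge
  have hport : matrix_merge A11 A12 A21 A22 =
      (List.range A11.length).foldl (fun B i =>
        innerF (A11.getD i []) (A12.getD i []) (A21.getD i []) (A22.getD i [])
          A11.length i A11.length B)
        (List.replicate (2*A11.length) (List.replicate (2*A11.length) 0)) := rfl
  rw [hport,
      outerF_eq A11 A12 A21 A22 A11.length r11 r12 r21 r22 A11.length le_rfl]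
  simp [matrix_merge_alt]
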